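-- pv_equiv track=rewrite | github.com/chnlyi/i2b2 | data_process.py | get_time_flattened_label
-- ===== SOURCE A (Python) =====
-- def get_time_flattened_label(label):
--     c = '.'
--     positions = [pos for pos, char in enumerate(label) if char == c]
--     if label != 'O':
--         sl = slice(positions[0]+1,positions[2])
--         time_flattened_labels = [label[sl], label[positions[2]+1:]]
--     else:
--         time_flattened_labels = [label]
--     return time_flattened_labels
-- ===== SOURCE B (Python) =====
-- def get_time_flattened_label(label):
--     if label == 'O':
--         return [label]
--     parts = label.split('.', 3)
--     return [parts[1] + '.' + parts[2], parts[3]]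
-- ===== Notes on version B (the rewrite author's own statement) =====
-- stated objective: idiomatic
-- what changed: Replaces the enumerate-all-dot-positions comprehension plus slice arithmetic by a single maxsplit tokenization: parts = label.split('.', 3), returning [parts[1]+'.'+parts[2], parts[3]].
import Mathlib
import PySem

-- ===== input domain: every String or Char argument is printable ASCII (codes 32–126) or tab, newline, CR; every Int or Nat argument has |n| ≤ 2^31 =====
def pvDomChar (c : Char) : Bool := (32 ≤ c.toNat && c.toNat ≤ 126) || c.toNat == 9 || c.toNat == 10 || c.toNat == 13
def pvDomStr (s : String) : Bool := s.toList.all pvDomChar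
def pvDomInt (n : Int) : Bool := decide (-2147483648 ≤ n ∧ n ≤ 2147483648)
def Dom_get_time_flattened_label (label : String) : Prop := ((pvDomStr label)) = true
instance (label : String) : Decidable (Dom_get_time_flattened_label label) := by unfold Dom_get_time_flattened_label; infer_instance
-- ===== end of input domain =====

-- B replaces A's enumerate-all-dot-positions comprehension plus slice arithmetic by a single
-- maxsplit tokenization (label.split('.', 3)) and field indexing; same O(n) cost, more idiomatic.

-- ===== PORT A =====
def get_time_flattened_label (label : String) : List String :=
  let c := '.'
  let positions : List Int :=
    ((PySem.List.enumerate label.toList 0).filter (fun pc => pc.2 == c)).map (fun pc => pc.1)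
  if label ≠ "O" then
    -- positions[0] / positions[2] raise IndexError when fewer than 3 dots; excluded by Pre_
    match PySem.List.pyGet? positions 0, PySem.List.pyGet? positions 2 with
    | some p0, some p2 =>
        [PySem.Str.slice label (some (p0 + 1)) (some p2),
         PySem.Str.slice label (some (p2 + 1)) none]
    | _, _ => []
  else
    [label]

-- ===== PORT B =====
def get_time_flattened_label_alt (label : String) : List String :=
  if label == "O" then [label]
  else
    match PySem.Str.splitMax? label "." 3 with
    | none => []
    | some parts =>
      -- parts[1] / parts[2] / parts[3] raise IndexError when fewer than 3 dots; excluded by Pre_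
      match PySem.List.pyGet? parts 1 with
      | none => []
      | some s1 =>
        match PySem.List.pyGet? parts 2 with
        | none => []
        | some s2 =>
          match PySem.List.pyGet? parts 3 with
          | none => []
          | some s3 => [s1 ++ "." ++ s2, s3]

-- ===== PRECONDITION & SPEC =====
-- Pre_ excludes exactly the labels other than "O" with fewer than three '.' characters,
-- on which the Python A raises IndexError (positions[2]).
def Pre_get_time_flattened_label (label : String) : Prop :=
  label = "O" ∨ 3 ≤ label.toList.count '.'
instance (label : String) : Decidable (Pre_get_time_flattened_label label) := by
  unfold Pre_get_time_flattened_label; infer_instance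
def pvWitness_get_time_flattened_label : String := "B.time.after.admission"

def Spec_get_time_flattened_label (label : String) (out : List String) : Prop :=
  out = get_time_flattened_label_alt label
instance (label : String) (out : List String) : Decidable (Spec_get_time_flattened_label label out) := by
  unfold Spec_get_time_flattened_label; infer_instance

-- ===== CLAIM (what is proved, stated in full; the proofs are below) =====
def Claim_equal_get_time_flattened_label : Prop :=
  ∀ (label : String), Dom_get_time_flattened_label label →
    Pre_get_time_flattened_label label →
    Spec_get_time_flattened_label label (get_time_flattened_label label)

-- ===== LEMMAS AND PROOFS =====

-- three-way decomposition of a string with at least three dots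
theorem pv_ex1 (cs : List Char) (h : 1 ≤ cs.count '.') :
    ∃ a r, cs = a ++ '.' :: r ∧ '.' ∉ a := by
  induction cs with
  | nil => simp at h
  | cons x xs ih =>
    by_cases hx : x = '.'
    · exact ⟨[], xs, by simp [hx], by simp⟩
    · have h' : 1 ≤ xs.count '.' := by
        simpa [List.count_cons, hx] using h
      obtain ⟨a, r, hcs, ha⟩ := ih h'
      exact ⟨x :: a, r, by simp [hcs], by simp [ha]; exact fun hx' => hx hx'.symm⟩

theorem pv_ex3 (cs : List Char) (h : 3 ≤ cs.count '.') :
    ∃ a b c d, cs = a ++ '.' :: (b ++ '.' :: (c ++ '.' :: d)) ∧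
      '.' ∉ a ∧ '.' ∉ b ∧ '.' ∉ c := by
  obtain ⟨a, r, hcs, ha⟩ := pv_ex1 cs (by omega)
  have hr : 2 ≤ r.count '.' := by
    have : cs.count '.' = a.count '.' + (1 + r.count '.') := by
      simp [hcs, List.count_append]; omega
    have ha0 : a.count '.' = 0 := List.count_eq_zero.mpr ha
    omega
  obtain ⟨b, r2, hr2, hb⟩ := pv_ex1 r (by omega)
  have hr2c : 1 ≤ r2.count '.' := by
    have : r.count '.' = b.count '.' + (1 + r2.count '.') := by
      simp [hr2, List.count_append]; omega
    have hb0 : b.count '.' = 0 := List.count_eq_zero.mpr hb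
    omega
  obtain ⟨c, d, hd, hc⟩ := pv_ex1 r2 hr2c
  exact ⟨a, b, c, d, by simp [hcs, hr2, hd], ha, hb, hc⟩

-- A side: the filtered enumerate on a dot-free block is empty
theorem pv_filter_dotfree (a : List Char) (h : '.' ∉ a) (s : Int) :
    (PySem.List.enumerate a s).filter (fun pc => pc.2 == '.') = [] := by
  rw [List.filter_eq_nil_iff]
  intro p hp
  obtain ⟨k, hk, rfl⟩ := (PySem.List.mem_enumerate_iff a s p).mp hp
  have : a[k] ∈ a := List.getElem_mem hk
  simp only [beq_iff_eq]
  intro hdot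
  exact h (hdot ▸ this)

def pvPos (l : List Char) (s : Int) : List Int :=
  ((PySem.List.enumerate l s).filter (fun pc => pc.2 == '.')).map (fun pc => pc.1)

theorem pvPos_append (a l : List Char) (h : '.' ∉ a) (s : Int) :
    pvPos (a ++ l) s = pvPos l (s + a.length) := by
  simp [pvPos, PySem.List.enumerate_append, List.filter_append, pv_filter_dotfree a h]

theorem pvPos_cons_dot (l : List Char) (s : Int) :
    pvPos ('.' :: l) s = s :: pvPos l (s + 1) := by
  simp [pvPos, PySem.List.enumerate_cons]

-- B side: computing splitOnMax on the decomposition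
theorem pv_go_step (a : List Char) (h : '.' ∉ a) :
    ∀ (fuel m : Nat) (rest cur : List Char) (acc : List (List Char)),
      a.length < fuel →
      PySem.Chars.splitOnMax.go ['.'] fuel (m + 1) (a ++ '.' :: rest) cur acc
        = PySem.Chars.splitOnMax.go ['.'] (fuel - (a.length + 1)) m rest []
            ((cur.reverse ++ a) :: acc) := by
  induction a with
  | nil =>
    intro fuel m rest cur acc hf
    cases fuel with
    | zero => omega
    | succ fuel' =>
      have hpre : ['.'].isPrefixOf ('.' :: rest) = true := by simp [List.isPrefixOf]
      simp [PySem.Chars.splitOnMax.go, hpre]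
  | cons x a' ih =>
    intro fuel m rest cur acc hf
    have hx : x ≠ '.' := fun hx => h (by simp [hx])
    have ha' : '.' ∉ a' := fun hm => h (by simp [hm])
    cases fuel with
    | zero => omega
    | succ fuel' =>
      have hpre : ['.'].isPrefixOf (x :: (a' ++ '.' :: rest)) = false := by
        simp [List.isPrefixOf]; exact fun hx' => absurd hx'.symm hx
      have hf' : a'.length < fuel' := by simp at hf; omega
      have hstep : PySem.Chars.splitOnMax.go ['.'] (fuel' + 1) (m + 1)
            (x :: (a' ++ '.' :: rest)) cur acc
          = PySem.Chars.splitOnMax.go ['.'] fuel' (m + 1) (a' ++ '.' :: rest) (x :: cur) acc := by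
        simp [PySem.Chars.splitOnMax.go, hpre]
      rw [List.cons_append, hstep, ih ha' fuel' m rest (x :: cur) acc hf']
      rw [show fuel' - (a'.length + 1) = fuel' + 1 - ((x :: a').length + 1) by simp only [List.length_cons]; omega]
      simp

theorem pv_go_zero (fuel : Nat) (l cur : List Char) (acc : List (List Char)) :
    PySem.Chars.splitOnMax.go ['.'] fuel 0 l cur acc
      = ((cur.reverse ++ l) :: acc).reverse := by
  cases fuel <;> cases l <;> simp [PySem.Chars.splitOnMax.go]

theorem pv_split3 (a b c d : List Char) (ha : '.' ∉ a) (hb : '.' ∉ b) (hc : '.' ∉ c) :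
    PySem.Chars.splitOnMax (a ++ '.' :: (b ++ '.' :: (c ++ '.' :: d))) ['.'] 3
      = [a, b, c, d] := by
  have h3 : ¬ ((3 : Int) < 0) := by omega
  rw [PySem.Chars.splitOnMax, if_neg h3]
  have hlen : (a ++ '.' :: (b ++ '.' :: (c ++ '.' :: d))).length
      = a.length + b.length + c.length + d.length + 3 := by simp; omega
  rw [hlen, show (3 : Int).toNat = 3 from rfl]
  have h1 := pv_go_step a ha (a.length + b.length + c.length + d.length + 3 + 1) 2
    (b ++ '.' :: (c ++ '.' :: d)) [] [] (by omega)
  norm_num at h1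
  rw [h1]
  have h2 := pv_go_step b hb (b.length + c.length + d.length + 3) 1
    (c ++ '.' :: d) [] [a] (by omega)
  norm_num at h2
  rw [show a.length + b.length + c.length + d.length + 3 + 1 - (a.length + 1)
      = b.length + c.length + d.length + 3 by omega, h2]
  have h3' := pv_go_step c hc (c.length + d.length + 2) 0 d [] [b, a] (by omega)
  norm_num at h3'
  rw [show b.length + c.length + d.length + 3 - (b.length + 1)
      = c.length + d.length + 2 by omega, h3', pv_go_zero]
  simp

theorem pv_main (label : String) (hO : label ≠ "O")
    (hcount : 3 ≤ label.toList.count '.') :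
    get_time_flattened_label label = get_time_flattened_label_alt label := by
  obtain ⟨a, b, c, d, hdec, ha, hb, hc⟩ := pv_ex3 label.toList hcount
  -- B side: the maxsplit-3 tokenization
  have hsplit : PySem.Str.splitMax? label "." 3
      = some [String.ofList a, String.ofList b, String.ofList c, String.ofList d] := by
    rw [PySem.Str.splitMax?]
    have h1 : PySem.Chars.splitMax? label.toList ['.'] 3 = some [a, b, c, d] := by
      rw [PySem.Chars.splitMax?]
      simp only [List.isEmpty_cons, if_false, Bool.false_eq_true]
      rw [hdec, pv_split3 a b c d ha hb hc]
    have hsep : ("." : String).toList = ['.'] := rfl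
    rw [hsep, h1]
    rfl
  -- A side: the three dot positions
  have hpos : pvPos label.toList 0
      = (a.length : Int) :: ((a.length : Int) + 1 + b.length)
          :: ((a.length : Int) + 1 + b.length + 1 + c.length)
          :: pvPos d ((a.length : Int) + 1 + b.length + 1 + c.length + 1) := by
    rw [hdec, pvPos_append a _ ha, pvPos_cons_dot, pvPos_append b _ hb, pvPos_cons_dot,
      pvPos_append c _ hc, pvPos_cons_dot]
    norm_num
  -- the two output strings agree
  have e1 : PySem.Str.slice label (some ((a.length : Int) + 1))
        (some ((a.length : Int) + 1 + b.length + 1 + c.length))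
      = String.ofList b ++ "." ++ String.ofList c := by
    rw [← String.toList_inj, PySem.Str.toList_slice, PySem.Chars.slice_eq_listSlice]
    have h1 : (a.length : Int) + 1 = ((a.length + 1 : Nat) : Int) := by push_cast; ring
    have h2 : (a.length : Int) + 1 + b.length + 1 + c.length
        = ((a.length + 1 + (b.length + 1 + c.length) : Nat) : Int) := by push_cast; ring
    rw [h2, h1, PySem.List.slice_natCast, hdec]
    rw [show a ++ '.' :: (b ++ '.' :: (c ++ '.' :: d)) = (a ++ ['.']) ++ (b ++ '.' :: (c ++ '.' :: d))
      by simp]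
    rw [show a.length + 1 = (a ++ ['.']).length by simp, List.drop_left]
    rw [show (a ++ ['.']).length + (b.length + 1 + c.length) - (a ++ ['.']).length
      = (b ++ '.' :: c).length by simp; omega]
    rw [show b ++ '.' :: (c ++ '.' :: d) = (b ++ '.' :: c) ++ '.' :: d by simp, List.take_left]
    simp [String.toList_append]
  have e2 : PySem.Str.slice label
        (some ((a.length : Int) + 1 + b.length + 1 + c.length + 1)) none
      = String.ofList d := by
    rw [← String.toList_inj, PySem.Str.toList_slice, PySem.Chars.slice_eq_listSlice]
    have h1 : (a.length : Int) + 1 + b.length + 1 + c.length + 1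
        = ((a.length + 1 + b.length + 1 + c.length + 1 : Nat) : Int) := by push_cast; ring
    rw [h1, PySem.List.slice_from_natCast, hdec]
    rw [show a ++ '.' :: (b ++ '.' :: (c ++ '.' :: d))
      = (a ++ '.' :: (b ++ '.' :: c) ++ ['.']) ++ d by simp]
    rw [show a.length + 1 + b.length + 1 + c.length + 1
      = (a ++ '.' :: (b ++ '.' :: c) ++ ['.']).length by simp; omega, List.drop_left]
    simp
  -- assemble
  have hOb : (label == "O") = false := beq_eq_false_iff_ne.mpr hO
  rw [get_time_flattened_label, get_time_flattened_label_alt]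
  rw [if_pos hO, if_neg (by simp [hOb])]
  have hposA : ((PySem.List.enumerate label.toList 0).filter (fun pc => pc.2 == '.')).map
      (fun pc => pc.1) = pvPos label.toList 0 := rfl
  rw [hposA, hpos, hsplit]
  have g0 : PySem.List.pyGet? ((a.length : Int) :: ((a.length : Int) + 1 + b.length)
      :: ((a.length : Int) + 1 + b.length + 1 + c.length)
      :: pvPos d ((a.length : Int) + 1 + b.length + 1 + c.length + 1)) 0
      = some ((a.length : Int)) := by
    rw [PySem.List.pyGet?, PySem.List.pyIdx?, if_pos (by omega : (0:Int) ≤ 0),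
      if_pos (by simp; omega)]
    rfl
  have g2 : PySem.List.pyGet? ((a.length : Int) :: ((a.length : Int) + 1 + b.length)
      :: ((a.length : Int) + 1 + b.length + 1 + c.length)
      :: pvPos d ((a.length : Int) + 1 + b.length + 1 + c.length + 1)) 2
      = some ((a.length : Int) + 1 + b.length + 1 + c.length) := by
    rw [PySem.List.pyGet?, PySem.List.pyIdx?, if_pos (by omega : (0:Int) ≤ 2),
      if_pos (by simp; omega)]
    rfl
  rw [g0, g2]
  simp only [PySem.List.pyGet?, PySem.List.pyIdx?]
  norm_num
  rw [e1, e2]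
  exact ⟨rfl, rfl⟩

-- ===== VERDICT (by name: the statement is the Claim_ definition above) =====
theorem get_time_flattened_label_spec : Claim_equal_get_time_flattened_label := by
  intro label hdom hpre
  unfold Spec_get_time_flattened_label
  by_cases hO : label = "O"
  · subst hO; decide
  · exact pv_main label hO (hpre.resolve_left hO)
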